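-- pv_equiv track=rewrite | github.com/NVIDIA/Fuser | tools/compare_benchmark.py | uses_forbidden_option
-- ===== SOURCE A (Python) =====
-- def uses_forbidden_option(arg: str) -> str:
--     for forbidden_option in (
--         "--benchmark_out",
--         "--benchmark_out_format",
--         "--benchmark_format",
--     ):
--         # Depending on which shell, the name of a long option and the value can
--         # be split by a space or an =.
--         if arg == forbidden_option or arg.startswith(forbidden_option + "="):
--             return forbidden_option
--     return ""
-- ===== SOURCE B (Python) =====
-- def uses_forbidden_option(arg: str) -> str:
--     # All three forbidden options share the prefix "--benchmark_": test that
--     # prefix once, slice it off, and match only the remaining suffix key.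
--     base = "--benchmark_"
--     if arg.startswith(base):
--         tail = arg[len(base):].partition("=")[0]
--         if tail in ("out", "out_format", "format"):
--             return base + tail
--     return ""
-- ===== Notes on version B (the rewrite author's own statement) =====
-- stated objective: alternative
-- what changed: Instead of looping over the three full option strings with equality/startswith per candidate, B factors out their shared prefix '--benchmark_': one prefix test, slice the prefix off, take the suffix up to the first '=' via partition, match only the short suffix key and reconstruct the option as prefix+suffix.
import Mathlib
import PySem

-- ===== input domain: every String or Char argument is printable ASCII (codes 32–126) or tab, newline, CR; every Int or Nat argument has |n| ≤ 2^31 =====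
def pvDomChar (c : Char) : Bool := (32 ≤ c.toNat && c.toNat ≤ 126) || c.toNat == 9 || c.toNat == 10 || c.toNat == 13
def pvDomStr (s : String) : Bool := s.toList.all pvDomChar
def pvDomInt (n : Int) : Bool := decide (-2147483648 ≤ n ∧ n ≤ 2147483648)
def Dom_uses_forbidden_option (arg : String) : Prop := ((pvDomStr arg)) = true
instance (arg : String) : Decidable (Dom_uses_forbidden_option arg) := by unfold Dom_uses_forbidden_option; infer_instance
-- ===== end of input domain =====

-- B factors out the shared prefix "--benchmark_" of the three forbidden options: one prefix
-- test, slice the prefix off, match only the suffix key before '=' — a different decomposition.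


-- ===== PORT A =====
-- the for-loop with early return over the tuple of forbidden options
def pvALoop (arg : String) : List String → String
  | [] => ""
  | opt :: rest =>
      if arg == opt || PySem.Str.startswith arg (opt ++ "=") then opt
      else pvALoop arg rest

def uses_forbidden_option (arg : String) : String :=
  pvALoop arg ["--benchmark_out", "--benchmark_out_format", "--benchmark_format"]

-- ===== PORT B =====
def uses_forbidden_option_alt (arg : String) : String :=
  let base := "--benchmark_"
  if PySem.Str.startswith arg base then
    -- arg[len(base):]
    let rest := PySem.Str.slice arg (some (base.length : Int)) none
    -- rest.partition("=")[0]: the characters before the first '=' (exact hand port for the 1-char separator)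
    let tail := String.ofList (rest.toList.takeWhile (· ≠ '='))
    if tail = "out" ∨ tail = "out_format" ∨ tail = "format" then base ++ tail
    else ""
  else ""

-- ===== PRECONDITION & SPEC =====
def Spec_uses_forbidden_option (arg : String) (out : String) : Prop := out = uses_forbidden_option_alt arg
instance (arg : String) (out : String) : Decidable (Spec_uses_forbidden_option arg out) := by unfold Spec_uses_forbidden_option; infer_instance

-- ===== CLAIM (what is proved, stated in full; the proofs are below) =====
def Claim_equal_uses_forbidden_option : Prop := ∀ (arg : String), Dom_uses_forbidden_option arg → Spec_uses_forbidden_option arg (uses_forbidden_option arg)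

-- ===== LEMMAS AND PROOFS =====

-- characterization: the chars of t before the first '=' equal an '='-free word w
-- iff A's per-option test (t = w or w ++ "=" is a prefix of t) fires
theorem pv_take_eq_iff (t w : List Char) (hw : '=' ∉ w) :
    t.takeWhile (· ≠ '=') = w ↔ (t = w ∨ (w ++ ['=']) <+: t) := by
  induction w generalizing t with
  | nil =>
    cases t with
    | nil => simp
    | cons c rest =>
      by_cases hc : c = '='
      · subst hc; simp [List.IsPrefix]
      · simp [hc, List.cons_prefix_iff]
  | cons a w ih =>
    have ha : a ≠ '=' := fun h => hw (h ▸ List.mem_cons_self ..)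
    have hw' : '=' ∉ w := fun h => hw (List.mem_cons_of_mem _ h)
    cases t with
    | nil => simp [List.IsPrefix]
    | cons c rest =>
      by_cases hc : c = '='
      · subst hc
        have htw : List.takeWhile (fun x => decide (x ≠ '=')) ('=' :: rest) = [] := by simp
        constructor
        · intro h; rw [htw] at h; exact absurd h (by simp)
        · rintro (h | h)
          · injection h with h1 _; exact absurd h1.symm ha
          · rw [List.cons_append] at h
            exact absurd (List.cons_prefix_cons.mp h).1 ha
      · have hcb : decide (c ≠ '=') = true := by simp [hc]
        rw [List.takeWhile_cons, if_pos hcb]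
        constructor
        · intro h
          injection h with h1 h2
          subst h1
          rcases (ih rest hw').mp h2 with h | h
          · exact Or.inl (by rw [h])
          · exact Or.inr (by rw [List.cons_append]; exact List.cons_prefix_cons.mpr ⟨rfl, h⟩)
        · rintro (h | h)
          · injection h with h1 h2
            subst h1; subst h2
            exact congrArg _ ((ih rest hw').mpr (Or.inl rfl))
          · rw [List.cons_append] at h
            rcases List.cons_prefix_cons.mp h with ⟨h1, h2⟩
            subst h1
            exact congrArg _ ((ih rest hw').mpr (Or.inr h2))

-- A's per-option test, as a statement about the chars of arg before the first '='
theorem pv_cond_iff (arg w : String) (hw : '=' ∉ w.toList) :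
    (arg == w || PySem.Str.startswith arg (w ++ "=")) = true
      ↔ arg.toList.takeWhile (· ≠ '=') = w.toList := by
  have h2 : PySem.Str.startswith arg (w ++ "=") = true ↔ (w.toList ++ ['=']) <+: arg.toList := by
    rw [PySem.Str.startswith_eq, PySem.Chars.startswith_iff]
    have : (w ++ ("=" : String)).toList = w.toList ++ ['='] := by simp
    rw [this]
  rw [Bool.or_eq_true, beq_iff_eq, h2, pv_take_eq_iff _ _ hw]
  constructor
  · rintro (h | h)
    · exact Or.inl (by rw [h])
    · exact Or.inr h
  · rintro (h | h)
    · exact Or.inl (String.toList_injective h)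
    · exact Or.inr h

-- takeWhile through a prefix every char of which satisfies the predicate
theorem pv_takeWhile_append (base t : List Char) (p : Char → Bool)
    (h : ∀ c ∈ base, p c = true) :
    (base ++ t).takeWhile p = base ++ t.takeWhile p := by
  induction base with
  | nil => simp
  | cons c cs ih =>
    rw [List.cons_append, List.takeWhile_cons, if_pos (h c (List.mem_cons_self ..)),
      ih (fun d hd => h d (List.mem_cons_of_mem _ hd))]
    simp

-- ===== VERDICT (by name: the statement is the Claim_ definition above) =====
set_option maxRecDepth 4000 in
theorem uses_forbidden_option_spec : Claim_equal_uses_forbidden_option := by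
  intro arg _
  unfold Spec_uses_forbidden_option uses_forbidden_option uses_forbidden_option_alt
  have c1 := pv_cond_iff arg "--benchmark_out" (by decide)
  have c2 := pv_cond_iff arg "--benchmark_out_format" (by decide)
  have c3 := pv_cond_iff arg "--benchmark_format" (by decide)
  by_cases hs : PySem.Str.startswith arg "--benchmark_" = true
  · -- arg = "--benchmark_" ++ t
    obtain ⟨t, ht⟩ : ∃ t, arg.toList = ("--benchmark_" : String).toList ++ t := by
      rw [PySem.Str.startswith_eq, PySem.Chars.startswith_iff] at hs
      obtain ⟨t, ht⟩ := hs
      exact ⟨t, ht.symm⟩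
    have hrest : (PySem.Str.slice arg (some (("--benchmark_" : String).length : Int)) none).toList
        = t := by
      rw [PySem.Str.toList_slice, PySem.Chars.slice_eq_listSlice,
        PySem.List.slice_from_natCast, ht]
      have hlen : ("--benchmark_" : String).length = ("--benchmark_" : String).toList.length := rfl
      rw [hlen, List.drop_left]
    have htw : arg.toList.takeWhile (· ≠ '=')
        = ("--benchmark_" : String).toList ++ t.takeWhile (· ≠ '=') := by
      rw [ht]
      refine pv_takeWhile_append _ _ _ ?_
      intro c hc
      have hne : '=' ∉ ("--benchmark_" : String).toList := by decide
      simp only [decide_eq_true_eq]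
      intro h
      exact hne (h ▸ hc)
    rw [htw] at c1 c2 c3
    have e1 : (("--benchmark_" : String).toList ++ t.takeWhile (· ≠ '=')
        = ("--benchmark_out" : String).toList) ↔ t.takeWhile (· ≠ '=') = "out".toList := by
      constructor
      · intro h; exact List.append_cancel_left (by exact h)
      · intro h; rw [h]; rfl
    have e2 : (("--benchmark_" : String).toList ++ t.takeWhile (· ≠ '=')
        = ("--benchmark_out_format" : String).toList) ↔ t.takeWhile (· ≠ '=') = "out_format".toList := by
      constructor
      · intro h; exact List.append_cancel_left (by exact h)
      · intro h; rw [h]; rfl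
    have e3 : (("--benchmark_" : String).toList ++ t.takeWhile (· ≠ '=')
        = ("--benchmark_format" : String).toList) ↔ t.takeWhile (· ≠ '=') = "format".toList := by
      constructor
      · intro h; exact List.append_cancel_left (by exact h)
      · intro h; rw [h]; rfl
    simp only [hs, if_pos, hrest]
    have hofl : ∀ (w : String), String.ofList (t.takeWhile (· ≠ '=')) = w
        ↔ t.takeWhile (· ≠ '=') = w.toList := by
      intro w
      constructor
      · intro h; rw [← h, String.toList_ofList]
      · intro h; rw [h, String.ofList_toList]
    by_cases h1 : t.takeWhile (· ≠ '=') = "out".toList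
    · simp only [pvALoop]
      rw [if_pos (c1.mpr (e1.mpr h1))]
      rw [if_pos (Or.inl ((hofl "out").mpr h1)), (hofl "out").mpr h1]
      rfl
    · simp only [pvALoop]
      rw [if_neg (show ¬ _ = true from fun h => h1 (e1.mp (c1.mp h)))]
      by_cases h2 : t.takeWhile (· ≠ '=') = "out_format".toList
      · rw [if_pos (c2.mpr (e2.mpr h2))]
        rw [if_pos (Or.inr (Or.inl ((hofl "out_format").mpr h2))), (hofl "out_format").mpr h2]
        rfl
      · rw [if_neg (show ¬ _ = true from fun h => h2 (e2.mp (c2.mp h)))]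
        by_cases h3 : t.takeWhile (· ≠ '=') = "format".toList
        · rw [if_pos (c3.mpr (e3.mpr h3))]
          rw [if_pos (Or.inr (Or.inr ((hofl "format").mpr h3))), (hofl "format").mpr h3]
          rfl
        · rw [if_neg (show ¬ _ = true from fun h => h3 (e3.mp (c3.mp h))),
            if_neg (by
              rintro (h | h | h)
              · exact h1 ((hofl "out").mp h)
              · exact h2 ((hofl "out_format").mp h)
              · exact h3 ((hofl "format").mp h))]
  · -- base prefix absent: every per-option test is false, both sides return ""
    have hns : ¬ ("--benchmark_" : String).toList <+: arg.toList := by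
      rw [PySem.Str.startswith_eq, PySem.Chars.startswith_iff] at hs
      exact hs
    have hpre : ∀ (w : String), ("--benchmark_" : String).toList <+: w.toList →
        arg.toList.takeWhile (· ≠ '=') ≠ w.toList := by
      intro w hw h
      exact hns (h ▸ hw |>.trans (List.takeWhile_prefix _) |> fun x => x)
    simp only [hs, Bool.false_eq_true, if_false, pvALoop]
    rw [if_neg (show ¬ _ = true from fun h =>
          hpre "--benchmark_out" (by decide) (c1.mp h)),
        if_neg (show ¬ _ = true from fun h =>
          hpre "--benchmark_out_format" (by decide) (c2.mp h)),
        if_neg (show ¬ _ = true from fun h =>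
          hpre "--benchmark_format" (by decide) (c3.mp h))]
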